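-- pv_equiv track=rewrite | github.com/k0rval4n/Respaldo-k0rval4n-IIC2233 | Tareas/T2/entrega_intermedia/utilidades_cliente.py | riesgo_izquierda
-- ===== SOURCE A (Python) =====
-- def riesgo_izquierda(coords: tuple, tablero: list):
--     fil_i = coords[0]
--     col_i = coords[1]
--     choco = False
--     for resta in range(1, col_i + 1):
--         col = col_i - resta
--         if tablero[fil_i][col] == "P":
--             choco = True
--         if not choco and tablero[fil_i][col] == "C":
--             return True
--     return False
-- ===== SOURCE B (Python) =====
-- def riesgo_izquierda(coords: tuple, tablero: list):
--     fil_i, col_i = coords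
--     left = tablero[fil_i][:col_i] if col_i > 0 else []
--     c = max((i for i, cell in enumerate(left) if cell == "C"), default=-1)
--     p = max((i for i, cell in enumerate(left) if cell == "P"), default=-1)
--     return c > p
-- ===== Notes on version B (the rewrite author's own statement) =====
-- stated objective: alternative
-- what changed: Replaces A's right-to-left scan with a short-circuit early return and a 'choco' flag by slicing the left portion of the row once and comparing the maximum index of a 'C' with the maximum index of a 'P' (nearest-leftward cell is a C iff c > p).
import Mathlib
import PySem

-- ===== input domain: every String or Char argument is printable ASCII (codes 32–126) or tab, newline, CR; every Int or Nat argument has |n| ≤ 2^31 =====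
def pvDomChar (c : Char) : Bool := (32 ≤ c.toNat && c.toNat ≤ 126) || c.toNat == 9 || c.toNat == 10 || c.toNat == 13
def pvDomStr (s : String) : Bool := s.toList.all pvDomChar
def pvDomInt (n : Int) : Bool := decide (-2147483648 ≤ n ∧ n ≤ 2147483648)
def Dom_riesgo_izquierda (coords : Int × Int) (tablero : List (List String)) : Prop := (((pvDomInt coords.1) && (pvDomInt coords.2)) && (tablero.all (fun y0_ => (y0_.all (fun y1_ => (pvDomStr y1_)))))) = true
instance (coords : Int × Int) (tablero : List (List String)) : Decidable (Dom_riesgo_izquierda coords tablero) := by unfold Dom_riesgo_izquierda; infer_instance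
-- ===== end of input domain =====

-- B replaces A's stateful right-to-left scan (choco flag + early return) by slicing the
-- left part of the row once and comparing the maximal index of a "C" with the maximal
-- index of a "P" (objective: alternative decomposition; same cost).

-- ===== PORT A =====
-- literal port of A: for resta in range(1, col_i+1): col = col_i - resta; the early
-- 'return True' is the (choco, Option Bool) state; tablero[fil_i][col] is pyGetD under Pre_.
def riesgo_izquierda (coords : Int × Int) (tablero : List (List String)) : Bool :=
  let fil_i := coords.1
  let col_i := coords.2
  let r := (PySem.List.pyRange 1 (col_i + 1) 1).foldl
    (fun (st : Bool × Option Bool) resta =>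
      match st.2 with
      | some v => (st.1, some v)
      | none =>
        let col := col_i - resta
        let cell := PySem.List.pyGetD ((PySem.List.pyGet? tablero fil_i).getD []) col ""
        let choco := if cell == "P" then true else st.1
        if !choco && (cell == "C") then (choco, some true) else (choco, none))
    (false, none)
  r.2.getD false

-- ===== PORT B =====
-- port of Source B: left = tablero[fil_i][:col_i] if col_i > 0 else []; c / p are the
-- max(generator, default=-1) passes over enumerate(left), ported as running-max folds.
def riesgo_izquierda_alt (coords : Int × Int) (tablero : List (List String)) : Bool :=
  let fil_i := coords.1
  let col_i := coords.2
  let left : List String :=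
    if 0 < col_i then
      PySem.List.slice ((PySem.List.pyGet? tablero fil_i).getD []) none (some col_i)
    else []
  let c : Int := (PySem.List.enumerate left).foldl
    (fun acc q => if q.2 == "C" then max acc q.1 else acc) (-1)
  let p : Int := (PySem.List.enumerate left).foldl
    (fun acc q => if q.2 == "P" then max acc q.1 else acc) (-1)
  decide (c > p)

-- ===== PRECONDITION & SPEC =====
-- Pre_ excludes exactly the inputs where A raises an IndexError: col_i > 0 with fil_i out
-- of range for tablero, or the selected row shorter than col_i.
def Pre_riesgo_izquierda (coords : Int × Int) (tablero : List (List String)) : Prop :=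
  coords.2 ≤ 0 ∨
    (PySem.Raise.InRange tablero.length coords.1 ∧
      coords.2 ≤ (((PySem.List.pyGet? tablero coords.1).getD []).length : Int))
instance (coords : Int × Int) (tablero : List (List String)) : Decidable (Pre_riesgo_izquierda coords tablero) := by unfold Pre_riesgo_izquierda; infer_instance

def pvWitness_riesgo_izquierda : (Int × Int) × List (List String) := ((0, 2), [["", "C"]])

def Spec_riesgo_izquierda (coords : Int × Int) (tablero : List (List String)) (out : Bool) : Prop := out = riesgo_izquierda_alt coords tablero
instance (coords : Int × Int) (tablero : List (List String)) (out : Bool) : Decidable (Spec_riesgo_izquierda coords tablero out) := by unfold Spec_riesgo_izquierda; infer_instance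

-- ===== CLAIM (what is proved, stated in full; the proofs are below) =====
def Claim_equal_riesgo_izquierda : Prop := ∀ (coords : Int × Int) (tablero : List (List String)), Dom_riesgo_izquierda coords tablero → Pre_riesgo_izquierda coords tablero → Spec_riesgo_izquierda coords tablero (riesgo_izquierda coords tablero)

-- ===== LEMMAS AND PROOFS =====

-- A's loop body, abstracted over the cell value (definitionally the port's body).
def pvStepA (st : Bool × Option Bool) (cell : String) : Bool × Option Bool :=
  match st.2 with
  | some v => (st.1, some v)
  | none =>
    let choco := if cell == "P" then true else st.1
    if !choco && (cell == "C") then (choco, some true) else (choco, none)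

-- what A computes on the reversed left segment: first non-empty decision wins
def pvScanRev : List String → Bool
  | [] => false
  | x :: xs => if x == "C" then true else if x == "P" then false else pvScanRev xs

-- B's running max of indices of `needle`
def pvMaxIdx (needle : String) (l : List String) : Int :=
  (PySem.List.enumerate l).foldl
    (fun acc q => if q.2 == needle then max acc q.1 else acc) (-1)

-- A's port, written as pvStepA folded over the list of visited cells
theorem pvA_eq (fil_i col_i : Int) (tablero : List (List String)) :
    riesgo_izquierda (fil_i, col_i) tablero
      = (((PySem.List.pyRange 1 (col_i + 1) 1).map
            (fun r => PySem.List.pyGetD ((PySem.List.pyGet? tablero fil_i).getD [])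
              (col_i - r) "")).foldl pvStepA (false, none)).2.getD false := by
  rw [List.foldl_map]
  rfl

-- B's port, written with pvMaxIdx
theorem pvB_eq (fil_i col_i : Int) (tablero : List (List String)) :
    riesgo_izquierda_alt (fil_i, col_i) tablero
      = decide (pvMaxIdx "P" (if 0 < col_i then
            PySem.List.slice ((PySem.List.pyGet? tablero fil_i).getD []) none (some col_i)
          else []) < pvMaxIdx "C" (if 0 < col_i then
            PySem.List.slice ((PySem.List.pyGet? tablero fil_i).getD []) none (some col_i)
          else [])) := rfl

theorem pvStepA_some (l : List String) (b : Bool) (r : Bool) :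
    l.foldl pvStepA (b, some r) = (b, some r) := by
  induction l with
  | nil => rfl
  | cons x xs ih => simpa [pvStepA] using ih

theorem pvStepA_choco (l : List String) :
    l.foldl pvStepA (true, none) = (true, none) := by
  induction l with
  | nil => rfl
  | cons x xs ih => simpa [pvStepA] using ih

theorem pvFoldA_eq_scanRev (l : List String) :
    ((l.foldl pvStepA (false, none)).2.getD false) = pvScanRev l := by
  induction l with
  | nil => rfl
  | cons x xs ih =>
    by_cases hC : x = "C"
    · subst hC
      simp [List.foldl_cons, pvStepA, pvStepA_some, pvScanRev]
    · by_cases hP : x = "P"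
      · subst hP
        simp [List.foldl_cons, pvStepA, pvStepA_choco, pvScanRev]
      · simpa [List.foldl_cons, pvStepA, hC, hP, pvScanRev] using ih

theorem pvEnumerate_append (l : List String) (x : String) (s : Int) :
    PySem.List.enumerate (l ++ [x]) s
      = PySem.List.enumerate l s ++ [((s + l.length : Int), x)] := by
  induction l generalizing s with
  | nil => simp [PySem.List.enumerate_cons]
  | cons y ys ih =>
    simp only [List.cons_append, PySem.List.enumerate_cons, ih]
    simp
    ring_nf

theorem pvMaxIdx_bound_aux (ps : List (Int × String)) (needle : String) (a b : Int)
    (ha : a ≤ b) (hps : ∀ q ∈ ps, q.1 ≤ b) :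
    ps.foldl (fun acc q => if q.2 == needle then max acc q.1 else acc) a ≤ b := by
  induction ps generalizing a with
  | nil => simpa using ha
  | cons q qs ih =>
    simp only [List.foldl_cons]
    apply ih
    · by_cases h : q.2 == needle
      · have := hps q (by simp)
        simp only [h, if_true]
        simp [ha, this]
      · simpa [h] using ha
    · intro r hr; exact hps r (by simp [hr])

theorem pvMaxIdx_lt_length (needle : String) (l : List String) :
    pvMaxIdx needle l < (l.length : Int) := by
  have h : pvMaxIdx needle l ≤ (l.length : Int) - 1 := by
    apply pvMaxIdx_bound_aux
    · have : (0:Int) ≤ (l.length : Int) := by positivity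
      omega
    · intro q hq
      have hmem : q.1 ∈ (PySem.List.enumerate l).map (·.1) := List.mem_map_of_mem hq
      rw [PySem.List.map_fst_enumerate] at hmem
      rw [PySem.List.mem_pyRange_one] at hmem
      omega
  omega

theorem pvMaxIdx_append (needle : String) (l : List String) (x : String) :
    pvMaxIdx needle (l ++ [x])
      = if x == needle then (l.length : Int) else pvMaxIdx needle l := by
  unfold pvMaxIdx
  rw [pvEnumerate_append, List.foldl_append]
  simp only [List.foldl_cons, List.foldl_nil, zero_add]
  by_cases h : x == needle
  · have hb := pvMaxIdx_lt_length needle l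
    unfold pvMaxIdx at hb
    simp only [h, if_true]
    omega
  · simp [h]

theorem pvScanRev_reverse (l : List String) :
    pvScanRev l.reverse = decide (pvMaxIdx "P" l < pvMaxIdx "C" l) := by
  induction l using List.reverseRecOn with
  | nil => simp [pvScanRev, pvMaxIdx, PySem.List.enumerate]
  | append_singleton l x ih =>
    rw [List.reverse_append]
    simp only [List.reverse_singleton, List.singleton_append]
    rw [pvMaxIdx_append, pvMaxIdx_append]
    by_cases hC : x = "C"
    · subst hC
      have hb := pvMaxIdx_lt_length "P" l
      simp [pvScanRev, hb]
    · by_cases hP : x = "P"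
      · subst hP
        have hb := pvMaxIdx_lt_length "C" l
        simp [pvScanRev, show ¬ ((l.length:Int) < pvMaxIdx "C" l) by omega]
      · simp only [pvScanRev, show (x == "C") = false by simp [hC],
          show (x == "P") = false by simp [hP], Bool.false_eq_true, if_false]
        simpa using ih

-- the list of cells A visits, in visit order, is (row.take n).reverse
theorem pvCells_eq (row : List String) (n : Nat) (hn : n ≤ row.length) :
    (PySem.List.pyRange 1 ((n : Int) + 1) 1).map
        (fun r => PySem.List.pyGetD row ((n : Int) - r) "")
      = (row.take n).reverse := by
  apply List.ext_getElem
  · simp [PySem.List.length_pyRange_one, Nat.min_eq_left hn]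
  · intro k hk1 hk2
    have hklt : k < n := by
      have := hk1
      simp [PySem.List.length_pyRange_one] at this
      omega
    simp only [List.getElem_map]
    rw [PySem.List.getElem_pyRange_one]
    have he : (n : Int) - (1 + (k : Int)) = ((n - 1 - k : Nat) : Int) := by omega
    rw [he, PySem.List.pyGetD_natCast]
    rw [List.getElem_reverse]
    rw [List.getElem_take]
    have hlen : (row.take n).length = n := by simp [Nat.min_eq_left hn]
    have hidx : n - 1 - k < row.length := by omega
    rw [List.getD_eq_getElem row "" hidx]
    congr 1
    omega

theorem riesgo_izquierda_eq (coords : Int × Int) (tablero : List (List String))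
    (hpre : Pre_riesgo_izquierda coords tablero) :
    riesgo_izquierda coords tablero = riesgo_izquierda_alt coords tablero := by
  obtain ⟨fil_i, col_i⟩ := coords
  rw [pvA_eq, pvB_eq]
  by_cases hc : 0 < col_i
  · rcases hpre with h0 | ⟨_, hlen⟩
    · omega
    replace hlen : col_i ≤ (((PySem.List.pyGet? tablero fil_i).getD []).length : Int) := hlen
    set row := (PySem.List.pyGet? tablero fil_i).getD [] with hrow
    set n := col_i.toNat with hn
    have hcol : (n : Int) = col_i := by omega
    have hnle : n ≤ row.length := by omega
    rw [if_pos hc, PySem.List.slice_to row (le_of_lt hc)]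
    rw [← hcol]
    simp only [Int.toNat_natCast]
    rw [pvCells_eq row n hnle, pvFoldA_eq_scanRev, pvScanRev_reverse]
    rfl
  · rw [PySem.List.pyRange_one_eq_nil (by omega), if_neg hc]
    simp [pvMaxIdx, PySem.List.enumerate]

-- ===== VERDICT (by name: the statement is the Claim_ definition above) =====
theorem riesgo_izquierda_spec : Claim_equal_riesgo_izquierda := by
  intro coords tablero _ hpre
  unfold Spec_riesgo_izquierda
  exact riesgo_izquierda_eq coords tablero hpre
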